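-- pv_equiv track=rewrite | github.com/rayniel95/Enog | code/utils.py | to_categories
-- ===== SOURCE A (Python) =====
-- from typing import List, Tuple, Dict, Any
--
-- def to_categories(a_list: List[str]) -> List[int]:
-- 	cats = {}
-- 	index = 0
-- 	other_list = []
-- 	for tag in a_list:
-- 		try:
-- 			other_list.append(cats[tag])
-- 		except:
-- 			cats[tag] = index
-- 			index += 1
-- 			other_list.append(cats[tag])
--
-- 	return other_list
-- ===== SOURCE B (Python) =====
-- def to_categories(a_list):
--     # Phase 1: first-occurrence position of each element.
--     firsts = [a_list.index(tag) for tag in a_list]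
--     # Phase 2: the distinct first-occurrence positions, increasing = category order.
--     order = sorted(set(firsts))
--     # Phase 3: a tag's category is the rank of its first-occurrence position.
--     return [order.index(p) for p in firsts]
-- ===== Notes on version B (the rewrite author's own statement) =====
-- stated objective: alternative
-- what changed: Replaced A's dict-based register-and-emit loop (assign the next counter on a KeyError) by a positional ranking algorithm with no dictionary at all: compute each element's first-occurrence position with list.index, sort the distinct positions, and emit each element's rank among them.
import Mathlib
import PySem

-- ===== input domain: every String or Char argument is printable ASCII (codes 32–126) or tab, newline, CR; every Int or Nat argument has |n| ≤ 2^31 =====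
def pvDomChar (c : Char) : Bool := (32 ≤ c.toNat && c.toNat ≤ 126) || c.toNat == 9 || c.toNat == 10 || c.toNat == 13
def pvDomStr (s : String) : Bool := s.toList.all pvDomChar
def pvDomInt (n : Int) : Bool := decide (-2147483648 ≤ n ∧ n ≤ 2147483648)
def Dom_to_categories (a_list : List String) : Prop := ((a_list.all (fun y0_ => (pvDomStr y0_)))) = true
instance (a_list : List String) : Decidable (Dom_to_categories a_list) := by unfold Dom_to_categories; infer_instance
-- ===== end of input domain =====

-- B replaces A's dict-based register-and-emit loop by a dictionary-free positional ranking: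
-- first-occurrence positions via list.index, sorted distinct positions, category = rank
-- (objective: alternative; A and B agree on the return value everywhere).


-- ===== PORT A =====
-- for tag in a_list: try append cats[tag] except: cats[tag] = index; index += 1; append cats[tag]
def to_categories (a_list : List String) : List Int :=
  (a_list.foldl
    (fun (s : PySem.Dict String Int × Int × List Int) tag =>
      match s.1.get? tag with
      | some v => (s.1, s.2.1, s.2.2 ++ [v])
      | none => (s.1.insert tag s.2.1, s.2.1 + 1, s.2.2 ++ [s.2.1]))
    ((PySem.Dict.empty : PySem.Dict String Int), (0 : Int), ([] : List Int))).2.2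

-- ===== PORT B =====
-- firsts = [a_list.index(tag) for tag in a_list]   (always hits; ported as index? + getD)
-- order = sorted(set(firsts))                       (sorted of a set: order-independent, exact)
-- return [order.index(p) for p in firsts]           (always hits; ported as index? + getD)
def to_categories_alt (a_list : List String) : List Int :=
  let firsts : List Int := a_list.map (fun tag => (((PySem.List.index? a_list tag).getD 0 : Nat) : Int))
  let order : List Int := PySem.List.sorted (PySem.Set.ofList firsts) (fun x => x) false
  firsts.map (fun p => (((PySem.List.index? order p).getD 0 : Nat) : Int))

-- ===== PRECONDITION & SPEC =====
def Spec_to_categories (a_list : List String) (out : List Int) : Prop := out = to_categories_alt a_list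
instance (a_list : List String) (out : List Int) : Decidable (Spec_to_categories a_list out) := by unfold Spec_to_categories; infer_instance

-- ===== CLAIM (what is proved, stated in full; the proofs are below) =====
def Claim_equal_to_categories : Prop := ∀ (a_list : List String), Dom_to_categories a_list → Spec_to_categories a_list (to_categories a_list)

-- ===== LEMMAS AND PROOFS =====

-- ---- A-side: the loop emits first-occurrence indices into the running distinct list ----

lemma update_cons (d : List String) (x : String) (l : List String) :
    PySem.Set.update d (x :: l) = PySem.Set.update (PySem.Set.add d x) l := by
  simp [PySem.Set.update]

lemma add_of_mem {α : Type} [BEq α] [LawfulBEq α] {d : List α} {x : α} (hx : x ∈ d) :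
    PySem.Set.add d x = d := by
  simp [PySem.Set.add, PySem.Set.contains, hx]

lemma add_of_not_mem {α : Type} [BEq α] [LawfulBEq α] {d : List α} {x : α} (hx : x ∉ d) :
    PySem.Set.add d x = d ++ [x] := by
  simp [PySem.Set.add, PySem.Set.contains, hx]

lemma update_eq_append (d : List String) (l : List String) :
    ∃ e, PySem.Set.update d l = d ++ e := by
  induction l generalizing d with
  | nil => exact ⟨[], by simp [PySem.Set.update]⟩
  | cons x l ih =>
    rw [update_cons]
    by_cases hx : x ∈ d
    · rw [add_of_mem hx]; exact ih d
    · rw [add_of_not_mem hx]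
      obtain ⟨e, he⟩ := ih (d ++ [x])
      exact ⟨x :: e, by simpa using he⟩

lemma idxOf_update_of_mem {d l : List String} {t : String} (h : t ∈ d) :
    (PySem.Set.update d l).idxOf t = d.idxOf t := by
  obtain ⟨e, he⟩ := update_eq_append d l
  rw [he]; exact List.idxOf_append_of_mem h

lemma A_loop (rest : List String) (c : PySem.Dict String Int) (d : List String)
    (out : List Int)
    (hc : ∀ t, c.get? t = if t ∈ d then some ((d.idxOf t : Nat) : Int) else none) :
    (rest.foldl
      (fun (s : PySem.Dict String Int × Int × List Int) tag =>
        match s.1.get? tag with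
        | some v => (s.1, s.2.1, s.2.2 ++ [v])
        | none => (s.1.insert tag s.2.1, s.2.1 + 1, s.2.2 ++ [s.2.1]))
      (c, (d.length : Int), out)).2.2
    = out ++ rest.map (fun t => (((PySem.Set.update d rest).idxOf t : Nat) : Int)) := by
  induction rest generalizing c d out with
  | nil => simp
  | cons tag rest ih =>
    simp only [List.foldl_cons, List.map_cons]
    by_cases hmem : tag ∈ d
    · have hget : c.get? tag = some ((d.idxOf tag : Nat) : Int) := by rw [hc tag]; simp [hmem]
      rw [hget]
      have := ih c d (out ++ [((d.idxOf tag : Nat) : Int)]) hc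
      show (rest.foldl _ (c, (d.length : Int), out ++ [((d.idxOf tag : Nat) : Int)])).2.2 = _
      rw [this]
      have hupd : PySem.Set.update d (tag :: rest) = PySem.Set.update d rest := by
        rw [update_cons, add_of_mem hmem]
      rw [hupd, idxOf_update_of_mem hmem]
      simp
    · have hget : c.get? tag = none := by rw [hc tag]; simp [hmem]
      rw [hget]
      have hc' : ∀ t, (c.insert tag (d.length : Int)).get? t =
          if t ∈ d ++ [tag] then some (((d ++ [tag]).idxOf t : Nat) : Int) else none := by
        intro t
        rw [PySem.Dict.get?_insert, hc t]
        by_cases ht : t = tag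
        · subst ht
          simp [hmem, List.idxOf_append]
        · simp only [if_neg ht]
          by_cases htd : t ∈ d
          · simp [htd, List.idxOf_append_of_mem htd]
          · simp [htd, ht]
      have hlen : (d.length : Int) + 1 = ((d ++ [tag]).length : Int) := by simp
      have := ih (c.insert tag (d.length : Int)) (d ++ [tag])
        (out ++ [(d.length : Int)]) hc'
      show (rest.foldl _
        (c.insert tag (d.length : Int), (d.length : Int) + 1, out ++ [(d.length : Int)])).2.2 = _
      rw [hlen, this]
      have hupd : PySem.Set.update d (tag :: rest) = PySem.Set.update (d ++ [tag]) rest := by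
        rw [update_cons, add_of_not_mem hmem]
      have hidx : (((PySem.Set.update (d ++ [tag]) rest).idxOf tag : Nat) : Int)
          = (d.length : Int) := by
        rw [idxOf_update_of_mem (by simp : tag ∈ d ++ [tag])]
        simp [List.idxOf_append, List.idxOf_eq_length hmem]
      rw [hupd, hidx]
      simp

-- ---- ordered dedup in cons form (proof-side view of PySem.Set.ofList) ----

def fdd {α : Type} [DecidableEq α] : List α → List α
  | [] => []
  | x :: l => x :: (fdd l).filter (fun a => decide (a ≠ x))

lemma mem_fdd {α : Type} [DecidableEq α] {l : List α} {a : α} : a ∈ fdd l ↔ a ∈ l := by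
  induction l with
  | nil => simp [fdd]
  | cons x l ih =>
    by_cases hax : a = x
    · subst hax; simp [fdd]
    · simp [fdd, List.mem_filter, hax, ih]

lemma update_eq_fdd {α : Type} [DecidableEq α] [BEq α] [LawfulBEq α] (l : List α) :
    ∀ d : List α, PySem.Set.update d l = d ++ (fdd l).filter (fun a => decide (a ∉ d)) := by
  induction l with
  | nil => intro d; simp [PySem.Set.update, fdd]
  | cons x l ih =>
    intro d
    have : PySem.Set.update d (x :: l) = PySem.Set.update (PySem.Set.add d x) l := by
      simp [PySem.Set.update]
    rw [this]
    by_cases hx : x ∈ d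
    · rw [add_of_mem hx, ih d, fdd]
      congr 1
      rw [List.filter_cons_of_neg (by simp [hx]), List.filter_filter]
      apply List.filter_congr
      intro a _
      by_cases had : a ∈ d <;> by_cases hax : a = x <;> simp_all
    · rw [add_of_not_mem hx, ih (d ++ [x]), fdd, List.append_assoc]
      congr 1
      rw [List.filter_cons_of_pos (by simp [hx]), List.filter_filter, List.singleton_append]
      congr 1
      apply List.filter_congr
      intro a _
      by_cases had : a ∈ d <;> by_cases hax : a = x <;> simp_all

lemma ofList_eq_fdd {α : Type} [DecidableEq α] [BEq α] [LawfulBEq α] (l : List α) :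
    PySem.Set.ofList l = fdd l := by
  have h := update_eq_fdd l []
  simpa [PySem.Set.ofList, PySem.Set.update] using h

-- first-occurrence positions strictly increase along fdd l
lemma fdd_pairwise_idxOf (l : List String) :
    (fdd l).Pairwise (fun a b => l.idxOf a < l.idxOf b) := by
  induction l with
  | nil => simp [fdd]
  | cons x l ih =>
    rw [fdd]
    constructor
    · intro a ha
      have hax : a ≠ x := by simp [List.mem_filter] at ha; exact ha.2
      rw [List.idxOf_cons_eq _ rfl, List.idxOf_cons_ne _ (fun h => hax h.symm)]
      omega
    · have hf := List.Pairwise.filter (p := fun a => decide (a ≠ x)) ih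
      refine List.Pairwise.imp_of_mem ?_ hf
      intro a b ha hb hab
      have hax : a ≠ x := by simp [List.mem_filter] at ha; exact ha.2
      have hbx : b ≠ x := by simp [List.mem_filter] at hb; exact hb.2
      rw [List.idxOf_cons_ne _ (fun h => hax h.symm), List.idxOf_cons_ne _ (fun h => hbx h.symm)]
      omega

-- fdd commutes with a map that is injective on the list's elements
lemma fdd_map {α β : Type} [DecidableEq α] [DecidableEq β] (f : α → β) (l : List α)
    (hinj : ∀ a ∈ l, ∀ b ∈ l, f a = f b → a = b) :
    fdd (l.map f) = (fdd l).map f := by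
  induction l with
  | nil => simp [fdd]
  | cons x l ih =>
    simp only [List.map_cons, fdd]
    rw [ih (fun a ha b hb => hinj a (by simp [ha]) b (by simp [hb]))]
    congr 1
    rw [List.filter_map]
    congr 1
    apply List.filter_congr
    intro a ha
    have hal : a ∈ l := by rw [mem_fdd] at ha; exact ha
    simp only [Function.comp]
    by_cases hax : a = x
    · subst hax; simp
    · have : f a ≠ f x := fun h => hax (hinj a (by simp [hal]) x (by simp) h)
      simp [hax, this]

-- idxOf commutes with an injective-on-members map
lemma idxOf_map_mem {α β : Type} [DecidableEq α] [DecidableEq β] (f : α → β) (D : List α)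
    (t : α) (ht : t ∈ D) (hinj : ∀ a ∈ D, f a = f t → a = t) :
    (D.map f).idxOf (f t) = D.idxOf t := by
  induction D with
  | nil => simp at ht
  | cons x D ih =>
    by_cases hxt : x = t
    · subst hxt
      simp
    · have hfx : f x ≠ f t := fun h => hxt (hinj x (by simp) h)
      rw [List.map_cons, List.idxOf_cons_ne _ hfx, List.idxOf_cons_ne _ hxt]
      have ht' : t ∈ D := by cases ht with
        | head => exact absurd rfl hxt
        | tail _ h => exact h
      rw [ih ht' (fun a ha h => hinj a (by simp [ha]) h)]

-- list.index of a member, as Python returns it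
lemma indexD_of_mem {α : Type} [BEq α] [LawfulBEq α] {l : List α} {t : α} (h : t ∈ l) :
    (PySem.List.index? l t).getD 0 = l.idxOf t := by
  rw [PySem.List.index?_eq_idxOf?, List.idxOf_eq_getD_idxOf?]
  have : (l.idxOf? t).isSome := by simpa [List.isSome_idxOf?] using h
  cases hx : l.idxOf? t <;> simp_all

-- idxOf into l, as an Int-valued key, injective on members of l
lemma g_inj (l : List String) (a b : String) (ha : a ∈ l) (_hb : b ∈ l)
    (h : ((l.idxOf a : Nat) : Int) = ((l.idxOf b : Nat) : Int)) : a = b := by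
  have : l.idxOf a = l.idxOf b := by exact_mod_cast h
  exact (List.idxOf_inj ha).mp this

-- ===== VERDICT (by name: the statement is the Claim_ definition above) =====
theorem to_categories_spec : Claim_equal_to_categories := by
  intro a_list _
  show to_categories a_list = to_categories_alt a_list
  -- the shared description: t ↦ index of t in the ordered dedup of a_list
  set g : String → Int := fun t => ((a_list.idxOf t : Nat) : Int) with hg
  -- A's value
  have hA := A_loop a_list PySem.Dict.empty [] [] (by intro t; simp)
  simp only [List.length_nil, Nat.cast_zero] at hA
  have hupdfdd : PySem.Set.update [] a_list = fdd a_list := by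
    have := update_eq_fdd a_list []
    simpa [PySem.Set.update] using this
  unfold to_categories
  simp only [to_categories_alt]
  rw [hA, hupdfdd, List.nil_append]
  -- B's firsts are g over a_list
  have hfirsts : a_list.map (fun tag => (((PySem.List.index? a_list tag).getD 0 : Nat) : Int))
      = a_list.map g := by
    apply List.map_congr_left
    intro t ht
    rw [indexD_of_mem ht]
  rw [hfirsts]
  -- B's order is the fdd of a_list mapped through g
  have hinj : ∀ a ∈ a_list, ∀ b ∈ a_list, g a = g b → a = b := fun a ha b hb h =>
    g_inj a_list a b ha hb h
  have hofl : PySem.Set.ofList (a_list.map g) = (fdd a_list).map g := by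
    rw [ofList_eq_fdd, fdd_map g a_list hinj]
  have hpw : ((fdd a_list).map g).Pairwise (fun a b => (a : Int) ≤ b) := by
    rw [List.pairwise_map]
    refine (fdd_pairwise_idxOf a_list).imp ?_
    intro a b hab
    simp only [hg]
    exact_mod_cast Nat.le_of_lt hab
  have horder : PySem.List.sorted (PySem.Set.ofList (a_list.map g)) (fun x => x) false
      = (fdd a_list).map g := by
    rw [hofl]
    exact PySem.List.sorted_eq_self_of_pairwise _ _ hpw
  rw [horder, List.map_map]
  -- elementwise
  apply List.map_congr_left
  intro t ht
  have htf : t ∈ fdd a_list := mem_fdd.mpr ht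
  have hmem : g t ∈ (fdd a_list).map g := List.mem_map.mpr ⟨t, htf, rfl⟩
  show ((((fdd a_list).idxOf t : Nat)) : Int)
      = (((PySem.List.index? ((fdd a_list).map g) (g t)).getD 0 : Nat) : Int)
  rw [indexD_of_mem hmem,
    idxOf_map_mem g (fdd a_list) t htf
      (fun a ha h => hinj a (mem_fdd.mp ha) t ht h)]
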